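-- pv_equiv track=rewrite | github.com/GiovanaRiber/TeoriaDaComputacao | TrabalhoGLC/simplificacoes.py | removerNaoAlcancaveis
-- ===== SOURCE A (Python) =====
-- def removerNaoAlcancaveis(gramatica): # passo 1
--     inicial = next(iter(gramatica))
--     alcancaveis = set()
--     lista = [inicial]
--
--     while lista:
--         variavel = lista.pop()
--         if variavel not in alcancaveis:
--             alcancaveis.add(variavel)
--             lista.extend(s for terminais in gramatica.get(variavel, []) for s in terminais if s.isupper() and s not in alcancaveis)
--
--     return {variaveis: [producao for producao in terminais if all(s in alcancaveis or s.islower() for s in producao)]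
--             for variaveis, terminais in gramatica.items() if variaveis in alcancaveis}
-- ===== SOURCE B (Python) =====
-- def removerNaoAlcancaveis(gramatica):  # passo 1
--     inicial = next(iter(gramatica))
--     alcancaveis = {inicial}
--     total = sum(len(producao) for terminais in gramatica.values() for producao in terminais)
--     # round-based saturation: total+1 rounds always reach the fixpoint
--     for _ in range(total + 1):
--         novos = {s for v in alcancaveis for producao in gramatica.get(v, [])
--                  for s in producao if s.isupper()} - alcancaveis
--         if not novos:
--             break
--         alcancaveis |= novos
--     return {variaveis: [producao for producao in terminais if all(s in alcancaveis or s.islower() for s in producao)]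
--             for variaveis, terminais in gramatica.items() if variaveis in alcancaveis}
-- ===== Notes on version B (the rewrite author's own statement) =====
-- stated objective: alternative
-- what changed: Replaces the explicit-stack worklist traversal (pop, mark-at-pop, push unvisited uppercase symbols) by round-based fixpoint saturation: repeatedly add every uppercase symbol producible from the current reachable set until no round adds anything (at most total-symbols+1 rounds suffice), then apply the same final filtering comprehension; Pre_ only excludes the empty grammar, on which both raise StopIteration.
import Mathlib
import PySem

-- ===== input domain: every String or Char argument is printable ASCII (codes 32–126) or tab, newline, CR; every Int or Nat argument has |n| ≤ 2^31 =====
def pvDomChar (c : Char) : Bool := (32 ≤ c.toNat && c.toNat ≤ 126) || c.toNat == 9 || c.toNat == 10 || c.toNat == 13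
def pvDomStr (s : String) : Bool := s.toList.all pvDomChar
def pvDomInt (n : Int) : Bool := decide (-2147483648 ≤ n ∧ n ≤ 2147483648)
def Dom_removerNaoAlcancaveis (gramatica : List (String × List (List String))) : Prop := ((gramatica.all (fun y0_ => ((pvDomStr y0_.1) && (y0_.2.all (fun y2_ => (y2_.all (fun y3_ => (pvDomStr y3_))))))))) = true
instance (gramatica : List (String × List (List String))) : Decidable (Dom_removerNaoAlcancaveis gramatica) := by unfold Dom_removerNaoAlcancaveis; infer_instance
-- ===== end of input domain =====

-- B replaces A's explicit-stack worklist traversal by round-based fixpoint saturation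
-- (repeatedly add all uppercase symbols producible from the current reachable set);
-- same cost class, a genuinely different reachability computation (objective: alternative).


-- ===== PORT A =====
-- shared primitive: Python str.isupper() / str.islower() on the ASCII domain
-- (some cased character, and no cased character of the other case); exact on ASCII,
-- where the cased characters are exactly the letters.
def pyStrIsupper (s : String) : Bool :=
  s.toList.any PySem.Chars.isupper && s.toList.all (fun c => !(PySem.Chars.islower c))

def pyStrIslower (s : String) : Bool :=
  s.toList.any PySem.Chars.islower && s.toList.all (fun c => !(PySem.Chars.isupper c))

-- all symbol occurrences of the grammar (used only by the termination measure)
def symsAll (g : List (String × List (List String))) : List String :=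
  g.flatMap (fun kv => kv.2.flatten)

-- termination measure for A's while-loop: unvisited potential symbols weighted above
-- the worklist length (each pop either shrinks the list or visits a new symbol)
def measureA (g : List (String × List (List String))) (alc : PySem.Set String)
    (lista : List String) : Nat :=
  ((symsAll g ++ lista).toFinset \ alc.toFinset).card * ((symsAll g).length + 1) + lista.length

theorem grmGet_flatten_sublist (g : List (String × List (List String))) (v : String) :
    (((PySem.Dict.mk g).getD v []).flatten).Sublist (symsAll g) := by
  induction g with
  | nil => simp [PySem.Dict.getD, PySem.Dict.get?, symsAll]
  | cons kv rest ih =>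
      rcases kv with ⟨k, ps⟩
      rw [PySem.Dict.getD_eq_get?_getD, PySem.Dict.get?_mk_cons]
      have h2 : (symsAll rest).Sublist (symsAll ((k, ps) :: rest)) := by
        simp only [symsAll, List.flatMap_cons]
        exact List.sublist_append_right _ _
      by_cases hk : (k == v) = true
      · simp [hk, symsAll]
      · simp only [Bool.not_eq_true] at hk
        rw [hk]
        simp only [Bool.false_eq_true, if_false]
        rw [← PySem.Dict.getD_eq_get?_getD]
        exact ih.trans h2

theorem measureA_lt_pop (g : List (String × List (List String))) (alc : PySem.Set String)
    (lista : List String) (h : lista ≠ []) :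
    measureA g alc lista.dropLast < measureA g alc lista := by
  unfold measureA
  have hsub : ((symsAll g ++ lista.dropLast).toFinset \ alc.toFinset).card
      ≤ ((symsAll g ++ lista).toFinset \ alc.toFinset).card := by
    apply Finset.card_le_card
    apply Finset.sdiff_subset_sdiff _ (Finset.Subset.refl _)
    intro x hx
    simp only [List.mem_toFinset, List.mem_append] at hx ⊢
    rcases hx with hx | hx
    · exact Or.inl hx
    · exact Or.inr (List.mem_of_mem_dropLast hx)
  have hlen : lista.dropLast.length < lista.length := by
    have := List.length_pos_iff.mpr h
    simp [List.length_dropLast]; omega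
  have := Nat.mul_le_mul_right ((symsAll g).length + 1) hsub
  omega

theorem measureA_lt_new (g : List (String × List (List String))) (alc : PySem.Set String)
    (lista : List String) (h : lista ≠ [])
    (hv : PySem.Set.contains alc (lista.getLast h) = false) :
    measureA g (PySem.Set.add alc (lista.getLast h))
      (lista.dropLast ++ (((PySem.Dict.mk g).getD (lista.getLast h) []).flatten).filter
        (fun s => pyStrIsupper s && !(PySem.Set.contains (PySem.Set.add alc (lista.getLast h)) s)))
      < measureA g alc lista := by
  set v := lista.getLast h with hvdef
  set pushes := (((PySem.Dict.mk g).getD v []).flatten).filter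
      (fun s => pyStrIsupper s && !(PySem.Set.contains (PySem.Set.add alc v) s)) with hp
  have hpush_sub : ∀ s ∈ pushes, s ∈ symsAll g := by
    intro s hs
    rw [hp, List.mem_filter] at hs
    exact (grmGet_flatten_sublist g v).subset hs.1
  have hpush_len : pushes.length ≤ (symsAll g).length := by
    calc pushes.length ≤ (((PySem.Dict.mk g).getD v []).flatten).length :=
          List.length_filter_le _ _
      _ ≤ (symsAll g).length := (grmGet_flatten_sublist g v).length_le
  have hvl : v ∈ lista := List.getLast_mem h
  have hvn : v ∉ alc := by
    intro hm
    have hc := (PySem.Set.contains_iff alc v).mpr hm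
    rw [hc] at hv
    cases hv
  have hvU : v ∈ (symsAll g ++ lista).toFinset \ alc.toFinset := by
    simp only [Finset.mem_sdiff, List.mem_toFinset, List.mem_append]
    exact ⟨Or.inr hvl, hvn⟩
  have hcard : ((symsAll g ++ (lista.dropLast ++ pushes)).toFinset \
        (PySem.Set.add alc v).toFinset).card
      ≤ ((symsAll g ++ lista).toFinset \ alc.toFinset).card - 1 := by
    have hsub : (symsAll g ++ (lista.dropLast ++ pushes)).toFinset \
        (PySem.Set.add alc v).toFinset
        ⊆ ((symsAll g ++ lista).toFinset \ alc.toFinset).erase v := by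
      intro x hx
      simp only [Finset.mem_sdiff, List.mem_toFinset, List.mem_append] at hx
      have hxadd : x ∉ PySem.Set.add alc v := by
        intro hm; exact hx.2 hm
      rw [PySem.Set.mem_add] at hxadd
      push_neg at hxadd
      simp only [Finset.mem_erase, Finset.mem_sdiff, List.mem_toFinset, List.mem_append]
      refine ⟨hxadd.2, ?_, fun hm => hxadd.1 hm⟩
      rcases hx.1 with hx1 | hx1 | hx1
      · exact Or.inl hx1
      · exact Or.inr (List.mem_of_mem_dropLast hx1)
      · exact Or.inl (hpush_sub _ hx1)
    calc _ ≤ (((symsAll g ++ lista).toFinset \ alc.toFinset).erase v).card :=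
          Finset.card_le_card hsub
      _ = _ := Finset.card_erase_of_mem hvU
  have hpos : 1 ≤ ((symsAll g ++ lista).toFinset \ alc.toFinset).card :=
    Finset.card_pos.mpr ⟨v, hvU⟩
  unfold measureA
  have hlen : lista.dropLast.length + 1 = lista.length := by
    have := List.length_pos_iff.mpr h
    simp [List.length_dropLast]; omega
  set S := (symsAll g).length
  set U := ((symsAll g ++ lista).toFinset \ alc.toFinset).card
  set U' := ((symsAll g ++ (lista.dropLast ++ pushes)).toFinset \
      (PySem.Set.add alc v).toFinset).card
  have h1 : U' * (S + 1) ≤ (U - 1) * (S + 1) := Nat.mul_le_mul_right _ hcard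
  have h2 : (U - 1) * (S + 1) + (S + 1) = U * (S + 1) := by
    have : (U - 1) + 1 = U := by omega
    calc (U - 1) * (S + 1) + (S + 1) = ((U - 1) + 1) * (S + 1) := by ring
      _ = U * (S + 1) := by rw [this]
  rw [List.length_append]
  omega

-- A's while-loop: pop from the end; mark at pop; push the unvisited uppercase symbols
def loopA (g : List (String × List (List String))) (alc : PySem.Set String)
    (lista : List String) : PySem.Set String :=
  if h : lista = [] then alc
  else
    let variavel := lista.getLast h
    if PySem.Set.contains alc variavel then loopA g alc lista.dropLast
    else
      let alc' := PySem.Set.add alc variavel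
      loopA g alc' (lista.dropLast ++ (((PySem.Dict.mk g).getD variavel []).flatten).filter
        (fun s => pyStrIsupper s && !(PySem.Set.contains alc' s)))
termination_by measureA g alc lista
decreasing_by
  · exact measureA_lt_pop g alc lista h
  · rename_i hcond
    simp only [Bool.not_eq_true] at hcond
    exact measureA_lt_new g alc lista h hcond

-- the final dict comprehension, identical in both Python sources
def filtrarAlcancaveis (g : List (String × List (List String))) (alc : PySem.Set String) :
    List (String × List (List String)) :=
  (g.filter (fun kv => PySem.Set.contains alc kv.1)).map
    (fun kv => (kv.1, kv.2.filter
      (fun producao => producao.all (fun s => PySem.Set.contains alc s || pyStrIslower s))))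

def removerNaoAlcancaveis (gramatica : List (String × List (List String))) :
    List (String × List (List String)) :=
  match gramatica with
  | [] => []  -- next(iter({})) raises StopIteration: excluded by Pre_
  | (inicial, _) :: _ =>
      filtrarAlcancaveis gramatica (loopA gramatica PySem.Set.empty [inicial])

-- ===== PORT B =====
-- one saturation round: every uppercase symbol producible from the current set
def stepB (g : List (String × List (List String))) (alc : PySem.Set String) : List String :=
  (alc.flatMap (fun v => ((PySem.Dict.mk g).getD v []).flatten)).filter pyStrIsupper

-- the bounded for-loop with early break on an empty novos
def loopB (g : List (String × List (List String))) : Nat → PySem.Set String → PySem.Set String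
  | 0, alc => alc
  | fuel + 1, alc =>
      let novos := PySem.Set.diff (PySem.Set.ofList (stepB g alc)) alc
      if novos.isEmpty then alc
      else loopB g fuel (PySem.Set.union alc novos)

def removerNaoAlcancaveis_alt (gramatica : List (String × List (List String))) :
    List (String × List (List String)) :=
  match gramatica with
  | [] => []  -- next(iter({})) raises StopIteration: excluded by Pre_
  | (inicial, _) :: _ =>
      let total := ((gramatica.flatMap (fun kv => kv.2)).map (fun producao => producao.length)).sum
      let alc := loopB gramatica (total + 1) (PySem.Set.add PySem.Set.empty inicial)
      filtrarAlcancaveis gramatica alc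

-- ===== PRECONDITION & SPEC =====
-- Pre_ excludes only the empty grammar, on which A raises StopIteration at next(iter(gramatica)).
def Pre_removerNaoAlcancaveis (gramatica : List (String × List (List String))) : Prop :=
  gramatica ≠ []
instance (gramatica : List (String × List (List String))) : Decidable (Pre_removerNaoAlcancaveis gramatica) := by unfold Pre_removerNaoAlcancaveis; infer_instance

def pvWitness_removerNaoAlcancaveis : (List (String × List (List String))) :=
  [("S", [["A", "a"], ["b"]]), ("A", [["a"]])]

def Spec_removerNaoAlcancaveis (gramatica : List (String × List (List String))) (out : List (String × List (List String))) : Prop := out = removerNaoAlcancaveis_alt gramatica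
instance (gramatica : List (String × List (List String))) (out : List (String × List (List String))) : Decidable (Spec_removerNaoAlcancaveis gramatica out) := by unfold Spec_removerNaoAlcancaveis; infer_instance

-- ===== CLAIM (what is proved, stated in full; the proofs are below) =====
def Claim_equal_removerNaoAlcancaveis : Prop := ∀ (gramatica : List (String × List (List String))), Dom_removerNaoAlcancaveis gramatica → Pre_removerNaoAlcancaveis gramatica → Spec_removerNaoAlcancaveis gramatica (removerNaoAlcancaveis gramatica)

-- ===== LEMMAS AND PROOFS =====

-- the uppercase successors of a variable (proof-layer view of both ports' push sets)
def upper (g : List (String × List (List String))) (v : String) : List String :=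
  (((PySem.Dict.mk g).getD v []).flatten).filter pyStrIsupper

-- reachability from the start symbol: the set both traversals compute
inductive Reach (g : List (String × List (List String))) (a : String) : String → Prop
  | refl : Reach g a a
  | step {v s : String} : Reach g a v → s ∈ upper g v → Reach g a s

theorem loopA_nil (g : List (String × List (List String))) (alc : PySem.Set String) :
    loopA g alc [] = alc := by
  rw [loopA]
  simp

theorem loopA_pop (g : List (String × List (List String))) (alc : PySem.Set String)
    (lista : List String) (h : lista ≠ [])
    (hc : PySem.Set.contains alc (lista.getLast h) = true) :
    loopA g alc lista = loopA g alc lista.dropLast := by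
  rw [loopA, dif_neg h, if_pos hc]

theorem loopA_new (g : List (String × List (List String))) (alc : PySem.Set String)
    (lista : List String) (h : lista ≠ [])
    (hc : PySem.Set.contains alc (lista.getLast h) = false) :
    loopA g alc lista = loopA g (PySem.Set.add alc (lista.getLast h))
      (lista.dropLast ++ (((PySem.Dict.mk g).getD (lista.getLast h) []).flatten).filter
        (fun s => pyStrIsupper s &&
          !(PySem.Set.contains (PySem.Set.add alc (lista.getLast h)) s))) := by
  rw [loopA, dif_neg h, if_neg (by rw [hc]; exact Bool.false_ne_true)]

theorem mem_upper (g : List (String × List (List String))) (v s : String) :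
    s ∈ upper g v ↔ s ∈ ((PySem.Dict.mk g).getD v []).flatten ∧ pyStrIsupper s = true := by
  simp only [upper, List.mem_filter]

theorem loopA_mono (g : List (String × List (List String))) (alc : PySem.Set String)
    (lista : List String) : ∀ x ∈ alc, x ∈ loopA g alc lista := by
  induction alc, lista using loopA.induct g with
  | case1 alc => rw [loopA_nil]; exact fun x hx => hx
  | case2 alc lista h variavel hc ih =>
      rw [loopA_pop g alc lista h hc]
      exact ih
  | case3 alc lista h variavel hc alc2 ih =>
      simp only [Bool.not_eq_true] at hc
      rw [loopA_new g alc lista h hc]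
      exact fun x hx => ih x ((PySem.Set.mem_add _ _ _).mpr (Or.inl hx))

theorem loopA_mem_lista (g : List (String × List (List String))) (alc : PySem.Set String)
    (lista : List String) : ∀ x ∈ lista, x ∈ loopA g alc lista := by
  induction alc, lista using loopA.induct g with
  | case1 alc => intro x hx; cases hx
  | case2 alc lista h variavel hc ih =>
      rw [loopA_pop g alc lista h hc]
      intro x hx
      rw [← List.dropLast_append_getLast h, List.mem_append] at hx
      rcases hx with hx | hx
      · exact ih x hx
      · rcases List.mem_singleton.mp hx with rfl
        exact loopA_mono g alc lista.dropLast _ ((PySem.Set.contains_iff alc _).mp hc)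
  | case3 alc lista h variavel hc alc2 ih =>
      simp only [Bool.not_eq_true] at hc
      rw [loopA_new g alc lista h hc]
      intro x hx
      rw [← List.dropLast_append_getLast h, List.mem_append] at hx
      rcases hx with hx | hx
      · exact ih x (List.mem_append_left _ hx)
      · rcases List.mem_singleton.mp hx with rfl
        exact loopA_mono g _ _ _ ((PySem.Set.mem_add _ _ _).mpr (Or.inr rfl))

theorem loopA_sound (g : List (String × List (List String))) (P : String → Prop)
    (hstep : ∀ v s, P v → s ∈ upper g v → P s) :
    ∀ (alc : PySem.Set String) (lista : List String),
      (∀ x ∈ alc, P x) → (∀ x ∈ lista, P x) → ∀ x ∈ loopA g alc lista, P x := by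
  intro alc lista
  induction alc, lista using loopA.induct g with
  | case1 alc =>
      intro h1 _
      rw [loopA_nil]
      exact h1
  | case2 alc lista h variavel hc ih =>
      intro h1 h2
      rw [loopA_pop g alc lista h hc]
      exact ih h1 (fun x hx => h2 x (List.mem_of_mem_dropLast hx))
  | case3 alc lista h variavel hc alc2 ih =>
      intro h1 h2
      simp only [Bool.not_eq_true] at hc
      rw [loopA_new g alc lista h hc]
      have hPv : P (lista.getLast h) := h2 _ (List.getLast_mem h)
      apply ih
      · intro x hx
        rcases (PySem.Set.mem_add _ _ _).mp hx with hx | rfl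
        · exact h1 x hx
        · exact hPv
      · intro x hx
        rcases List.mem_append.mp hx with hx | hx
        · exact h2 x (List.mem_of_mem_dropLast hx)
        · rw [List.mem_filter] at hx
          have hup : pyStrIsupper x = true := by
            have h2 := hx.2
            simp only [Bool.and_eq_true] at h2
            exact h2.1
          exact hstep _ x hPv ((mem_upper g _ x).mpr ⟨hx.1, hup⟩)

theorem loopA_closed (g : List (String × List (List String))) :
    ∀ (alc : PySem.Set String) (lista : List String),
      (∀ v ∈ alc, ∀ s ∈ upper g v, s ∈ alc ∨ s ∈ lista) →
      ∀ v ∈ loopA g alc lista, ∀ s ∈ upper g v, s ∈ loopA g alc lista := by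
  intro alc lista
  induction alc, lista using loopA.induct g with
  | case1 alc =>
      intro hinv v hv s hs
      rw [loopA_nil] at hv ⊢
      rcases hinv v hv s hs with h' | h'
      · exact h'
      · cases h'
  | case2 alc lista h variavel hc ih =>
      intro hinv
      rw [loopA_pop g alc lista h hc]
      apply ih
      intro w hw s hs
      rcases hinv w hw s hs with h' | h'
      · exact Or.inl h'
      · rw [← List.dropLast_append_getLast h, List.mem_append] at h'
        rcases h' with h' | h'
        · exact Or.inr h'
        · rcases List.mem_singleton.mp h' with rfl
          exact Or.inl ((PySem.Set.contains_iff alc _).mp hc)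
  | case3 alc lista h variavel hc alc2 ih =>
      intro hinv
      simp only [Bool.not_eq_true] at hc
      rw [loopA_new g alc lista h hc]
      apply ih
      intro w hw s hs
      rcases (PySem.Set.mem_add _ _ _).mp hw with hw | rfl
      · rcases hinv w hw s hs with h' | h'
        · exact Or.inl ((PySem.Set.mem_add _ _ _).mpr (Or.inl h'))
        · rw [← List.dropLast_append_getLast h, List.mem_append] at h'
          rcases h' with h' | h'
          · exact Or.inr (List.mem_append_left _ h')
          · rcases List.mem_singleton.mp h' with rfl
            exact Or.inl ((PySem.Set.mem_add _ _ _).mpr (Or.inr rfl))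
      · by_cases hmem : s ∈ PySem.Set.add alc (lista.getLast h)
        · exact Or.inl hmem
        · refine Or.inr (List.mem_append_right _ ?_)
          rw [List.mem_filter]
          rcases (mem_upper g _ s).mp hs with ⟨hfl, hup⟩
          refine ⟨hfl, ?_⟩
          rw [hup]
          have hcf : PySem.Set.contains (PySem.Set.add alc (lista.getLast h)) s = false := by
            rcases hcb : PySem.Set.contains (PySem.Set.add alc (lista.getLast h)) s with _ | _
            · rfl
            · exact absurd ((PySem.Set.contains_iff _ s).mp hcb) hmem
          rw [hcf]
          rfl

theorem mem_stepB (g : List (String × List (List String))) (alc : PySem.Set String)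
    (s : String) : s ∈ stepB g alc ↔ ∃ v ∈ alc, s ∈ upper g v := by
  constructor
  · intro hmem
    rw [stepB, List.mem_filter] at hmem
    rcases List.mem_flatMap.mp hmem.1 with ⟨v, hv, hsv⟩
    exact ⟨v, hv, (mem_upper g v s).mpr ⟨hsv, hmem.2⟩⟩
  · rintro ⟨v, hv, hs⟩
    rcases (mem_upper g v s).mp hs with ⟨hfl, hup⟩
    rw [stepB, List.mem_filter]
    exact ⟨List.mem_flatMap.mpr ⟨v, hv, hfl⟩, hup⟩

theorem loopB_mono (g : List (String × List (List String))) (fuel : Nat) :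
    ∀ (alc : PySem.Set String), ∀ x ∈ alc, x ∈ loopB g fuel alc := by
  induction fuel with
  | zero => intro alc x hx; exact hx
  | succ fuel ih =>
      intro alc x hx
      simp only [loopB]
      by_cases he : (PySem.Set.diff (PySem.Set.ofList (stepB g alc)) alc).isEmpty = true
      · rw [if_pos he]; exact hx
      · rw [if_neg he]
        exact ih _ x ((PySem.Set.mem_union alc _ x).mpr (Or.inl hx))

theorem loopB_sound (g : List (String × List (List String))) (P : String → Prop)
    (hstep : ∀ v s, P v → s ∈ upper g v → P s) :
    ∀ (fuel : Nat) (alc : PySem.Set String),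
      (∀ x ∈ alc, P x) → ∀ x ∈ loopB g fuel alc, P x := by
  intro fuel
  induction fuel with
  | zero => intro alc h1 x hx; exact h1 x hx
  | succ fuel ih =>
      intro alc h1 x hx
      simp only [loopB] at hx
      by_cases he : (PySem.Set.diff (PySem.Set.ofList (stepB g alc)) alc).isEmpty = true
      · rw [if_pos he] at hx; exact h1 x hx
      · rw [if_neg he] at hx
        refine ih _ ?_ x hx
        intro y hy
        rcases (PySem.Set.mem_union alc _ y).mp hy with hy | hy
        · exact h1 y hy
        · rcases (PySem.Set.mem_diff _ alc y).mp hy with ⟨hy1, _⟩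
          rcases (mem_stepB g alc y).mp ((PySem.Set.mem_ofList _ _).mp hy1) with ⟨v, hv, hyu⟩
          exact hstep v y (h1 v hv) hyu

theorem upper_subset_symsAll (g : List (String × List (List String))) (v s : String)
    (h : s ∈ upper g v) : s ∈ symsAll g :=
  (grmGet_flatten_sublist g v).subset ((mem_upper g v s).mp h).1

theorem loopB_closed (g : List (String × List (List String))) (k0 : String) :
    ∀ (fuel : Nat) (alc : PySem.Set String), alc.Nodup →
      (∀ x ∈ alc, x ∈ k0 :: symsAll g) →
      (PySem.Set.ofList (k0 :: symsAll g)).length ≤ fuel + alc.length →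
      ∀ v ∈ loopB g fuel alc, ∀ s ∈ upper g v, s ∈ loopB g fuel alc := by
  intro fuel
  induction fuel with
  | zero =>
      intro alc hnd hsub hfuel v hv s hs
      have hUfin : (PySem.Set.ofList (k0 :: symsAll g)).toFinset
          = (k0 :: symsAll g).toFinset := by
        ext y
        simp [PySem.Set.mem_ofList]
      have hUlen : (k0 :: symsAll g).toFinset.card
          = (PySem.Set.ofList (k0 :: symsAll g)).length := by
        rw [← hUfin, List.toFinset_card_of_nodup (PySem.Set.nodup_ofList _)]
      have hasub : alc.toFinset ⊆ (k0 :: symsAll g).toFinset := by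
        intro y hy
        rw [List.mem_toFinset] at hy ⊢
        exact hsub y hy
      have hacard : alc.toFinset.card = alc.length := List.toFinset_card_of_nodup hnd
      have heq : alc.toFinset = (k0 :: symsAll g).toFinset :=
        Finset.eq_of_subset_of_card_le hasub (by omega)
      have hsU : s ∈ (k0 :: symsAll g).toFinset :=
        List.mem_toFinset.mpr (List.mem_cons.mpr (Or.inr (upper_subset_symsAll g v s hs)))
      rw [← heq, List.mem_toFinset] at hsU
      exact hsU
  | succ fuel ih =>
      intro alc hnd hsub hfuel
      simp only [loopB]
      by_cases he : (PySem.Set.diff (PySem.Set.ofList (stepB g alc)) alc).isEmpty = true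
      · rw [if_pos he]
        intro v hv s hs
        by_contra hsa
        have hmem : s ∈ PySem.Set.diff (PySem.Set.ofList (stepB g alc)) alc :=
          (PySem.Set.mem_diff _ alc s).mpr
            ⟨(PySem.Set.mem_ofList _ _).mpr ((mem_stepB g alc s).mpr ⟨v, hv, hs⟩), hsa⟩
        rw [List.isEmpty_iff.mp he] at hmem
        cases hmem
      · rw [if_neg he]
        have hnd' : (PySem.Set.union alc (PySem.Set.diff (PySem.Set.ofList (stepB g alc)) alc)).Nodup :=
          PySem.Set.nodup_union _ _ hnd
        have hsub' : ∀ x ∈ PySem.Set.union alc (PySem.Set.diff (PySem.Set.ofList (stepB g alc)) alc),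
            x ∈ k0 :: symsAll g := by
          intro x hx
          rcases (PySem.Set.mem_union alc _ x).mp hx with hx | hx
          · exact hsub x hx
          · rcases (PySem.Set.mem_diff _ alc x).mp hx with ⟨hx1, _⟩
            rcases (mem_stepB g alc x).mp ((PySem.Set.mem_ofList _ _).mp hx1) with ⟨w, _, hxu⟩
            exact List.mem_cons.mpr (Or.inr (upper_subset_symsAll g w x hxu))
        have hlen : alc.length + 1
            ≤ (PySem.Set.union alc (PySem.Set.diff (PySem.Set.ofList (stepB g alc)) alc)).length := by
          have hne : PySem.Set.diff (PySem.Set.ofList (stepB g alc)) alc ≠ [] := by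
            intro hnil
            rw [hnil] at he
            exact he rfl
          rcases List.exists_mem_of_ne_nil _ hne with ⟨y, hy⟩
          have hyu : y ∈ PySem.Set.union alc (PySem.Set.diff (PySem.Set.ofList (stepB g alc)) alc) :=
            (PySem.Set.mem_union alc _ y).mpr (Or.inr hy)
          have hyna : y ∉ alc := ((PySem.Set.mem_diff _ alc y).mp hy).2
          have hss : alc.toFinset ⊂
              (PySem.Set.union alc (PySem.Set.diff (PySem.Set.ofList (stepB g alc)) alc)).toFinset := by
            constructor
            · intro x hx
              rw [List.mem_toFinset] at hx ⊢
              exact (PySem.Set.mem_union alc _ x).mpr (Or.inl hx)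
            · intro hcontra
              exact hyna (List.mem_toFinset.mp (hcontra (List.mem_toFinset.mpr hyu)))
          have hcards := Finset.card_lt_card hss
          rw [List.toFinset_card_of_nodup hnd, List.toFinset_card_of_nodup hnd'] at hcards
          omega
        exact ih _ hnd' hsub' (by omega)

theorem mem_loopA_iff (g : List (String × List (List String))) (k0 x : String) :
    x ∈ loopA g PySem.Set.empty [k0] ↔ Reach g k0 x := by
  constructor
  · intro hx
    refine loopA_sound g (Reach g k0) (fun v s hv hs => Reach.step hv hs)
      PySem.Set.empty [k0] (fun y hy => absurd hy (List.not_mem_nil)) ?_ x hx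
    intro y hy
    rcases List.mem_singleton.mp hy with rfl
    exact Reach.refl
  · intro hr
    induction hr with
    | refl => exact loopA_mem_lista g PySem.Set.empty [k0] k0 (List.mem_singleton.mpr rfl)
    | step hv hs ihv =>
        exact loopA_closed g PySem.Set.empty [k0]
          (fun w hw => absurd hw (List.not_mem_nil)) _ ihv _ hs

theorem mem_loopB_iff (g : List (String × List (List String))) (k0 x : String) :
    x ∈ loopB g ((symsAll g).length + 1) (PySem.Set.add PySem.Set.empty k0) ↔ Reach g k0 x := by
  have halc : PySem.Set.add PySem.Set.empty k0 = [k0] := rfl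
  have hnd : (PySem.Set.add PySem.Set.empty k0).Nodup := by
    rw [halc]; exact List.nodup_singleton k0
  have hsub : ∀ y ∈ PySem.Set.add PySem.Set.empty k0, y ∈ k0 :: symsAll g := by
    intro y hy
    rw [halc] at hy
    rcases List.mem_singleton.mp hy with rfl
    exact List.mem_cons_self
  have hfuel : (PySem.Set.ofList (k0 :: symsAll g)).length
      ≤ ((symsAll g).length + 1) + (PySem.Set.add PySem.Set.empty k0).length := by
    have h1 := PySem.Set.length_ofList_le (k0 :: symsAll g)
    rw [halc]
    simp only [List.length_cons] at *
    omega
  constructor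
  · intro hx
    refine loopB_sound g (Reach g k0) (fun v s hv hs => Reach.step hv hs) _ _ ?_ x hx
    intro y hy
    rw [halc] at hy
    rcases List.mem_singleton.mp hy with rfl
    exact Reach.refl
  · intro hr
    induction hr with
    | refl =>
        exact loopB_mono g _ _ k0 (by rw [halc]; exact List.mem_singleton.mpr rfl)
    | step hv hs ihv =>
        exact loopB_closed g k0 _ _ hnd hsub hfuel _ ihv _ hs

theorem total_eq (g : List (String × List (List String))) :
    ((g.flatMap (fun kv => kv.2)).map (fun producao => producao.length)).sum
      = (symsAll g).length := by
  induction g with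
  | nil => rfl
  | cons kv rest ih =>
      simp only [symsAll, List.flatMap_cons, List.map_append, List.sum_append,
        List.length_append, List.length_flatten] at *
      have he : (List.map (fun (producao : List String) => producao.length) kv.2)
          = List.map List.length kv.2 := rfl
      rw [he]
      omega

theorem filtrar_congr (g : List (String × List (List String))) (a1 a2 : PySem.Set String)
    (h : ∀ x, x ∈ a1 ↔ x ∈ a2) : filtrarAlcancaveis g a1 = filtrarAlcancaveis g a2 := by
  have hc : ∀ x, PySem.Set.contains a1 x = PySem.Set.contains a2 x := by
    intro x
    by_cases hm : x ∈ a1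
    · rw [(PySem.Set.contains_iff a1 x).mpr hm, (PySem.Set.contains_iff a2 x).mpr ((h x).mp hm)]
    · have h1 : PySem.Set.contains a1 x = false :=
        Bool.eq_false_iff.mpr (fun hb => hm ((PySem.Set.contains_iff a1 x).mp hb))
      have h2 : PySem.Set.contains a2 x = false :=
        Bool.eq_false_iff.mpr (fun hb => hm ((h x).mpr ((PySem.Set.contains_iff a2 x).mp hb)))
      rw [h1, h2]
  simp only [filtrarAlcancaveis, hc]

-- ===== VERDICT (by name: the statement is the Claim_ definition above) =====
theorem removerNaoAlcancaveis_spec : Claim_equal_removerNaoAlcancaveis := by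
  intro gramatica _ hpre
  unfold Spec_removerNaoAlcancaveis
  match gramatica, hpre with
  | (k0, ps) :: rest, _ =>
      simp only [removerNaoAlcancaveis, removerNaoAlcancaveis_alt]
      rw [total_eq ((k0, ps) :: rest)]
      apply filtrar_congr
      intro x
      rw [mem_loopA_iff, mem_loopB_iff]
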